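-- pv_equiv track=rewrite | github.com/marzikill/NSI | Bloc1-programmation/projet-traitement_image/Programme et images/traitement_imageGUI-V2.py | zoom
-- ===== SOURCE A (Python) =====
-- def zoom(l,h,photo):
--
--     #creation matrice vide (2xZ fois plus grande)
--     ligne=[0]*l*2
--     p2=[ligne[:] for i in range (0,h*2)]
--
--     #version 1
--     for j in range (0,h):
--         for k in range (0,l):
--             p2[j*2][k*2]=photo[j][k]
--             p2[j*2+1][k*2]=photo[j][k]
--             p2[j*2][k*2+1]=photo[j][k]
--             p2[j*2+1][k*2+1]=photo[j][k]
--
--     #version 2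
--     '''
--     for j in range (1,h-1):
--         for k in range (1,l-1):
--             p2[j*2][k*2]=int((photo[j][k]+photo[j-1][k]+photo[j][k-1]+photo[j-1][k-1])/4)    #haut gauche
--             p2[j*2+1][k*2]=int((photo[j][k]+photo[j+1][k]+photo[j][k-1]+photo[j+1][k-1])/4)  #haut droite
--             p2[j*2][k*2+1]=int((photo[j][k]+photo[j-1][k]+photo[j][k+1]+photo[j-1][k+1])/4)  #bas gauche
--             p2[j*2+1][k*2+1]=int((photo[j][k]+photo[j+1][k]+photo[j][k+1]+photo[j+1][k+1])/4)  #bas droite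
--     '''
--     return p2,l*2,h*2
-- ===== SOURCE B (Python) =====
-- def zoom(l, h, photo):
--     p2 = []
--     for j in range(h):
--         dr = [photo[j][k] for k in range(l) for _ in range(2)]
--         p2.append(dr)
--         p2.append(dr[:])
--     return p2, l * 2, h * 2
-- ===== Notes on version B (the rewrite author's own statement) =====
-- stated objective: simpler
-- what changed: B builds each doubled row once by horizontal replication and appends it (and a copy) twice, instead of pre-allocating a zero matrix and scatter-writing every pixel into four indexed cells.
import Mathlib
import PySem

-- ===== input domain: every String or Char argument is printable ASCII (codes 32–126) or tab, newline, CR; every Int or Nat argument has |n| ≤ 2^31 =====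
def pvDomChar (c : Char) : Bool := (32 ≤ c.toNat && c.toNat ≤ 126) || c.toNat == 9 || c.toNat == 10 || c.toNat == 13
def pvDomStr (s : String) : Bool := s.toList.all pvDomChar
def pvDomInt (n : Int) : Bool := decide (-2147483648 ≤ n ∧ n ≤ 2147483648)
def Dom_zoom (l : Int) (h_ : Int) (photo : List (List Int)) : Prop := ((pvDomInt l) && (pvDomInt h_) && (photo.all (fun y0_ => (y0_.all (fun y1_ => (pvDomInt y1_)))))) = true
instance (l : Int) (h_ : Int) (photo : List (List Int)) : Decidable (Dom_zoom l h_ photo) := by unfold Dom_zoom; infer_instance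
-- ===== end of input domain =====

-- B builds each doubled output row once and appends it twice (second time as a copy),
-- instead of A's pre-allocated zero matrix filled by scatter-writing each pixel into four indexed cells.

-- ===== PORT A =====
-- inner-loop body of A: the four indexed assignments (indices are in range under Pre_zoom;
-- the photo reads use default 0, which is only reached where Python raises, i.e. outside Pre_zoom)
def zoomInnerStep (photo : List (List Int)) (j : Int) (p2 : List (List Int)) (k : Int) : List (List Int) :=
  let v := PySem.List.pyGetD (PySem.List.pyGetD photo j []) k 0
  let p2 := p2.modify (j*2).toNat (fun r => r.set (k*2).toNat v)
  let p2 := p2.modify (j*2+1).toNat (fun r => r.set (k*2).toNat v)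
  let p2 := p2.modify (j*2).toNat (fun r => r.set (k*2+1).toNat v)
  p2.modify (j*2+1).toNat (fun r => r.set (k*2+1).toNat v)

-- the j-th iteration of A's outer loop: 'for k in range(0, l): …'
def zoomInner (l : Int) (photo : List (List Int)) (p2 : List (List Int)) (j : Int) : List (List Int) :=
  (PySem.List.pyRange 0 l 1).foldl (zoomInnerStep photo j) p2

def zoom (l : Int) (h_ : Int) (photo : List (List Int)) : List (List Int) × Int × Int :=
  let ligne : List Int := List.replicate l.toNat 0 ++ List.replicate l.toNat 0  -- [0]*l*2
  let p2 := (PySem.List.pyRange 0 (h_*2) 1).map (fun _ => ligne)               -- [ligne[:] for i in range(0, h*2)]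
  let p2 := (PySem.List.pyRange 0 h_ 1).foldl (zoomInner l photo) p2
  (p2, l*2, h_*2)

-- ===== PORT B =====
-- the doubled row: [photo[j][k] for k in range(l) for _ in range(2)]
def zoomAltRow (l : Int) (photo : List (List Int)) (j : Int) : List Int :=
  (PySem.List.pyRange 0 l 1).flatMap (fun k =>
    let v := PySem.List.pyGetD (PySem.List.pyGetD photo j []) k 0
    [v, v])

def zoom_alt (l : Int) (h_ : Int) (photo : List (List Int)) : List (List Int) × Int × Int :=
  let p2 := (PySem.List.pyRange 0 h_ 1).foldl (fun acc j =>
    let dr := zoomAltRow l photo j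
    acc ++ [dr, dr]) []
  (p2, l*2, h_*2)

-- ===== PRECONDITION & SPEC =====
-- Pre_zoom excludes exactly the inputs where A raises IndexError: 0 < l and 0 < h_ but photo
-- has fewer than h_ rows or one of its first h_ rows has fewer than l pixels.
def Pre_zoom (l : Int) (h_ : Int) (photo : List (List Int)) : Prop :=
  l ≤ 0 ∨ h_ ≤ 0 ∨ (h_ ≤ (photo.length : Int) ∧ ∀ row ∈ photo.take h_.toNat, l ≤ (row.length : Int))
instance (l : Int) (h_ : Int) (photo : List (List Int)) : Decidable (Pre_zoom l h_ photo) := by unfold Pre_zoom; infer_instance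
def pvWitness_zoom : Int × Int × List (List Int) := (2, 1, [[1, 2]])

def Spec_zoom (l : Int) (h_ : Int) (photo : List (List Int)) (out : List (List Int) × Int × Int) : Prop := out = zoom_alt l h_ photo
instance (l : Int) (h_ : Int) (photo : List (List Int)) (out : List (List Int) × Int × Int) : Decidable (Spec_zoom l h_ photo out) := by unfold Spec_zoom; infer_instance

-- ===== CLAIM (what is proved, stated in full; the proofs are below) =====
def Claim_equal_zoom : Prop := ∀ (l : Int) (h_ : Int) (photo : List (List Int)), Dom_zoom l h_ photo → Pre_zoom l h_ photo → Spec_zoom l h_ photo (zoom l h_ photo)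

-- ===== LEMMAS AND PROOFS =====

-- per-row effect of one k-iteration on one of the two touched rows
def pvRowStep (g : Int → Int) (r : List Int) (k : Int) : List Int :=
  (r.set (k*2).toNat (g k)).set (k*2+1).toNat (g k)

theorem pvSet_append {α : Type} : ∀ (pre : List α) (x : α) (rest : List α) (y : α),
    (pre ++ x :: rest).set pre.length y = pre ++ y :: rest := by
  intro pre; induction pre with
  | nil => simp
  | cons a t ih => intro x rest y; simp [ih]

theorem pvSet_append2 {α : Type} (pre : List α) (x y : α) (rest : List α) (z : α) :
    (pre ++ x :: y :: rest).set (pre.length + 1) z = pre ++ x :: z :: rest := by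
  have h := pvSet_append (pre ++ [x]) y rest z
  simp only [List.append_assoc, List.cons_append, List.nil_append, List.length_append, List.length_cons, List.length_nil, Nat.zero_add] at h
  exact h

theorem pvModify_append {α : Type} : ∀ (pre : List α) (x : α) (rest : List α) (f : α → α),
    (pre ++ x :: rest).modify pre.length f = pre ++ f x :: rest := by
  intro pre; induction pre with
  | nil => simp
  | cons a t ih => intro x rest f; simp [ih]

theorem pvModify_append2 {α : Type} (pre : List α) (x y : α) (rest : List α) (f : α → α) :
    (pre ++ x :: y :: rest).modify (pre.length + 1) f = pre ++ x :: f y :: rest := by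
  have h := pvModify_append (pre ++ [x]) y rest f
  simpa [List.append_assoc] using h

theorem pvInnerStep_at (photo : List (List Int)) (j : Int) (hj : 0 ≤ j)
    (pref : List (List Int)) (hp : pref.length = (j*2).toNat)
    (ra rb : List Int) (rest : List (List Int)) (k : Int) :
    zoomInnerStep photo j (pref ++ ra :: rb :: rest) k
      = pref ++ pvRowStep (fun k => PySem.List.pyGetD (PySem.List.pyGetD photo j []) k 0) ra k
             :: pvRowStep (fun k => PySem.List.pyGetD (PySem.List.pyGetD photo j []) k 0) rb k :: rest := by
  have h1 : (j*2).toNat = pref.length := hp.symm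
  have h2 : (j*2+1).toNat = pref.length + 1 := by omega
  simp only [zoomInnerStep, pvRowStep, h1, h2,
    pvModify_append, pvModify_append2]

theorem pvInner_list (photo : List (List Int)) (j : Int) (hj : 0 ≤ j) :
    ∀ (ks : List Int) (pref : List (List Int)), pref.length = (j*2).toNat →
    ∀ (ra rb : List Int) (rest : List (List Int)),
    ks.foldl (zoomInnerStep photo j) (pref ++ ra :: rb :: rest)
      = pref ++ ks.foldl (pvRowStep (fun k => PySem.List.pyGetD (PySem.List.pyGetD photo j []) k 0)) ra
             :: ks.foldl (pvRowStep (fun k => PySem.List.pyGetD (PySem.List.pyGetD photo j []) k 0)) rb :: rest := by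
  intro ks; induction ks with
  | nil => intro pref hp ra rb rest; simp
  | cons k ks ih =>
    intro pref hp ra rb rest
    simp only [List.foldl_cons]
    rw [pvInnerStep_at photo j hj pref hp ra rb rest k, ih pref hp]

theorem pvRow_fold (g : Int → Int) :
    ∀ (n : Nat) (a : Int), 0 ≤ a → ∀ (pre : List Int), pre.length = (a*2).toNat →
    (PySem.List.pyRange a (a + n) 1).foldl (pvRowStep g) (pre ++ List.replicate (2*n) 0)
      = pre ++ (PySem.List.pyRange a (a + n) 1).flatMap (fun k => [g k, g k]) := by
  intro n; induction n with
  | zero => intro a ha pre hp; simp [PySem.List.pyRange_one_eq_nil (le_refl a)]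
  | succ n ih =>
    intro a ha pre hp
    have hab : a < a + (n+1 : Nat) := by push_cast; omega
    rw [PySem.List.pyRange_one_cons hab]
    have hrep : List.replicate (2*(n+1)) (0 : Int) = 0 :: 0 :: List.replicate (2*n) 0 := by
      have : 2*(n+1) = (2*n) + 1 + 1 := by omega
      simp [this, List.replicate_succ]
    rw [hrep]
    simp only [List.foldl_cons, List.flatMap_cons]
    have hstep : pvRowStep g (pre ++ 0 :: 0 :: List.replicate (2*n) 0) a
        = (pre ++ [g a, g a]) ++ List.replicate (2*n) 0 := by
      have h1 : (a*2).toNat = pre.length := hp.symm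
      have h2 : (a*2+1).toNat = pre.length + 1 := by omega
      simp only [pvRowStep, h1, h2, pvSet_append, pvSet_append2]
      simp
    rw [hstep]
    have hlen : (pre ++ [g a, g a]).length = ((a+1)*2).toNat := by
      simp [hp]; omega
    have harith : a + (n+1 : Nat) = (a + 1) + (n : Nat) := by push_cast; ring
    rw [harith, ih (a+1) (by omega) (pre ++ [g a, g a]) hlen]
    simp

theorem pvRange_toNat (b : Int) : PySem.List.pyRange 0 b 1 = PySem.List.pyRange 0 ((b.toNat : Int)) 1 := by
  rw [PySem.List.pyRange_one, PySem.List.pyRange_one]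
  have h : (b - 0).toNat = ((b.toNat : Int) - 0).toNat := by omega
  rw [h]

theorem pvRow_ligne (l : Int) (photo : List (List Int)) (j : Int) :
    (PySem.List.pyRange 0 l 1).foldl (pvRowStep (fun k => PySem.List.pyGetD (PySem.List.pyGetD photo j []) k 0))
      (List.replicate l.toNat 0 ++ List.replicate l.toNat 0)
      = zoomAltRow l photo j := by
  have hrep : List.replicate l.toNat (0:Int) ++ List.replicate l.toNat 0 = List.replicate (2 * l.toNat) 0 := by
    rw [← List.replicate_add]; congr 1; omega
  have h0 : ((0:Int) + (l.toNat : Nat)) = ((l.toNat : Int)) := by ring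
  rw [hrep, pvRange_toNat l, zoomAltRow, pvRange_toNat l, ← h0]
  have := pvRow_fold (fun k => PySem.List.pyGetD (PySem.List.pyGetD photo j []) k 0) l.toNat 0 (le_refl 0) [] (by simp)
  simpa using this

theorem pvOuter (l : Int) (photo : List (List Int)) :
    ∀ (n : Nat) (a : Int), 0 ≤ a → ∀ (pref : List (List Int)), pref.length = (a*2).toNat →
    (PySem.List.pyRange a (a + n) 1).foldl (zoomInner l photo)
      (pref ++ List.replicate (2*n) (List.replicate l.toNat 0 ++ List.replicate l.toNat 0))
      = pref ++ (PySem.List.pyRange a (a + n) 1).flatMap (fun j => [zoomAltRow l photo j, zoomAltRow l photo j]) := by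
  intro n; induction n with
  | zero => intro a ha pref hp; simp [PySem.List.pyRange_one_eq_nil (le_refl a)]
  | succ n ih =>
    intro a ha pref hp
    have hab : a < a + (n+1 : Nat) := by push_cast; omega
    rw [PySem.List.pyRange_one_cons hab]
    have hrep : List.replicate (2*(n+1)) (List.replicate l.toNat (0:Int) ++ List.replicate l.toNat 0)
        = (List.replicate l.toNat (0:Int) ++ List.replicate l.toNat 0)
          :: (List.replicate l.toNat (0:Int) ++ List.replicate l.toNat 0)
          :: List.replicate (2*n) (List.replicate l.toNat (0:Int) ++ List.replicate l.toNat 0) := by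
      have : 2*(n+1) = (2*n) + 1 + 1 := by omega
      simp [this, List.replicate_succ]
    rw [hrep]
    simp only [List.foldl_cons, List.flatMap_cons]
    rw [show zoomInner l photo
          (pref ++ (List.replicate l.toNat (0:Int) ++ List.replicate l.toNat 0)
                :: (List.replicate l.toNat (0:Int) ++ List.replicate l.toNat 0)
                :: List.replicate (2*n) (List.replicate l.toNat (0:Int) ++ List.replicate l.toNat 0)) a
        = (pref ++ [zoomAltRow l photo a, zoomAltRow l photo a])
            ++ List.replicate (2*n) (List.replicate l.toNat (0:Int) ++ List.replicate l.toNat 0) from by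
      rw [zoomInner, pvInner_list photo a ha _ pref hp, pvRow_ligne]
      simp]
    have hlen : (pref ++ [zoomAltRow l photo a, zoomAltRow l photo a]).length = ((a+1)*2).toNat := by
      simp [hp]; omega
    have harith : a + (n+1 : Nat) = (a + 1) + (n : Nat) := by push_cast; ring
    rw [harith, ih (a+1) (by omega) _ hlen]
    simp

theorem pvMap_const {α β : Type} (c : β) : ∀ (xs : List α), xs.map (fun _ => c) = List.replicate xs.length c := by
  intro xs; induction xs with
  | nil => simp
  | cons a t ih => simp [ih, List.replicate_succ]

-- ===== VERDICT (by name: the statement is the Claim_ definition above) =====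
theorem zoom_spec : Claim_equal_zoom := by
  intro l h_ photo _ _
  unfold Spec_zoom zoom zoom_alt
  simp only []
  congr 1
  -- initial matrix is a replicate
  rw [pvMap_const, PySem.List.length_pyRange_one]
  have h2h : (h_*2 - 0).toNat = 2 * h_.toNat := by omega
  rw [h2h]
  -- B side: incremental appends are a flatMap
  rw [PySem.List.foldl_append_eq_flatMap]
  -- A side: the nested scatter loop produces the same flatMap
  rw [pvRange_toNat h_]
  have h0 : ((0:Int) + (h_.toNat : Nat)) = ((h_.toNat : Int)) := by ring
  rw [← h0]
  have := pvOuter l photo h_.toNat 0 (le_refl 0) [] (by simp)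
  simpa using this
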